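-- pv_equiv track=rewrite | github.com/yogesh-bhandare/sppu-aids-practicals | SEM-3/DSL_Group_A_B/DSL_2.py | find_most_frequent_mark
-- ===== SOURCE A (Python) =====
-- def find_most_frequent_mark(marks):
--     if not marks:
--         return None  # Return None if there are no valid marks
--
--     frequency = {}
--     most_frequent_marks = []
--     max_frequency = 0
--
--     for mark in marks:
--         if mark in frequency:
--             frequency[mark] += 1
--         else:
--             frequency[mark] = 1
--
--         if frequency[mark] > max_frequency:
--             max_frequency = frequency[mark]
--             most_frequent_marks = [mark]
--         elif frequency[mark] == max_frequency and mark not in most_frequent_marks: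
--             most_frequent_marks.append(mark)
--
--     return most_frequent_marks
-- ===== SOURCE B (Python) =====
-- def find_most_frequent_mark(marks):
--     if not marks:
--         return None
--     counts = {}
--     for m in marks:
--         counts[m] = counts.get(m, 0) + 1
--     M = max(counts.values())
--     result = []
--     running = {}
--     for m in marks:
--         running[m] = running.get(m, 0) + 1
--         if running[m] == M:
--             result.append(m)
--     return result
-- ===== Notes on version B (the rewrite author's own statement) =====
-- stated objective: simpler
-- what changed: Replaces A's single online pass (dict + dynamic running maximum with reset-on-new-max and a linear membership scan before each append) by two plain passes: first count all marks and take the global maximum frequency M, then collect each mark at the moment its running count reaches M, which needs no reset and no membership test.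
import Mathlib
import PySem

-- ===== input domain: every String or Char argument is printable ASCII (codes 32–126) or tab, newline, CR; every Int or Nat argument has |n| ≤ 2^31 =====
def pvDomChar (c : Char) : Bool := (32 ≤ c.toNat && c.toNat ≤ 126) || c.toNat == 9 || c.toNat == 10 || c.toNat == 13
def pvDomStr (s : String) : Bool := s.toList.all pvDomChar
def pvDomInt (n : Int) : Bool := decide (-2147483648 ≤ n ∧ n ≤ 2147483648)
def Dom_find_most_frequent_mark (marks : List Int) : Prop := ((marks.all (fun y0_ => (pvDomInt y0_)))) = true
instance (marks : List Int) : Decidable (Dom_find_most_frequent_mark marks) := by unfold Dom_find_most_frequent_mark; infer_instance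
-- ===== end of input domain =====

-- B replaces A's online pass (dict + dynamic running maximum with reset and a membership scan)
-- by two plain passes: count everything, take the max frequency M, then collect each mark when
-- its running count reaches M; objective: simpler.


-- ===== PORT A =====
-- loop body of A: state = (frequency, most_frequent_marks, max_frequency)
def pvStepA (st : PySem.Dict Int Int × List Int × Int) (mark : Int) :
    PySem.Dict Int Int × List Int × Int :=
  -- if mark in frequency: frequency[mark] += 1 else: frequency[mark] = 1
  -- (Python's `frequency[mark] += 1` reads then writes; the key is present in that branch, so getD is exact)
  let freq := if st.1.contains mark
    then st.1.insert mark (st.1.getD mark 0 + 1)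
    else st.1.insert mark 1
  let f := freq.getD mark 0      -- frequency[mark]; the key was just written, so getD is exact
  if st.2.2 < f then (freq, [mark], f)
  else if f = st.2.2 ∧ mark ∉ st.2.1 then (freq, st.2.1 ++ [mark], st.2.2)
  else (freq, st.2.1, st.2.2)

def find_most_frequent_mark (marks : List Int) : Option (List Int) :=
  if marks = [] then none
  else some (marks.foldl pvStepA (PySem.Dict.empty, [], 0)).2.1

-- ===== PORT B =====
-- loop body of B's second pass: state = (running, result); M is the max frequency
def pvStepB (M : Int) (st : PySem.Dict Int Int × List Int) (m : Int) :
    PySem.Dict Int Int × List Int :=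
  let running := st.1.insert m (st.1.getD m 0 + 1)   -- running[m] = running.get(m, 0) + 1
  (running, if running.getD m 0 = M then st.2 ++ [m] else st.2)  -- key just written: getD exact

def find_most_frequent_mark_alt (marks : List Int) : Option (List Int) :=
  if marks = [] then none
  else
    let counts := marks.foldl (fun d m => d.insert m (d.getD m 0 + 1)) PySem.Dict.empty
    let M := (PySem.List.max? counts.values (fun v => v)).getD 0  -- max(counts.values()); counts nonempty here
    some (marks.foldl (pvStepB M) (PySem.Dict.empty, [])).2

-- ===== PRECONDITION & SPEC =====
def Spec_find_most_frequent_mark (marks : List Int) (out : Option (List Int)) : Prop := out = find_most_frequent_mark_alt marks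
instance (marks : List Int) (out : Option (List Int)) : Decidable (Spec_find_most_frequent_mark marks out) := by unfold Spec_find_most_frequent_mark; infer_instance

-- ===== CLAIM (what is proved, stated in full; the proofs are below) =====
def Claim_equal_find_most_frequent_mark : Prop := ∀ (marks : List Int), Dom_find_most_frequent_mark marks → Spec_find_most_frequent_mark marks (find_most_frequent_mark marks)

-- ===== LEMMAS AND PROOFS =====

-- count of m in p, as an Int
def pvCnt (p : List Int) (m : Int) : Int := (p.count m : Int)

-- the "reach list": marks of rest, in order, at the positions where their running count
-- (within pre ++ rest) equals M
def pvReach : List Int → List Int → Int → List Int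
  | _, [], _ => []
  | pre, x :: xs, M => (if pvCnt (pre ++ [x]) x = M then [x] else []) ++ pvReach (pre ++ [x]) xs M

lemma pvCnt_append_singleton (p : List Int) (x m : Int) :
    pvCnt (p ++ [x]) m = pvCnt p m + (if m = x then 1 else 0) := by
  simp only [pvCnt, List.count_append]
  rcases eq_or_ne m x with h | h
  · simp [h]
  · simp [h, Ne.symm h]

lemma pvCnt_nonneg (p : List Int) (m : Int) : 0 ≤ pvCnt p m := by
  simp [pvCnt]

lemma pvReach_append (ys : List Int) : ∀ (pre : List Int) (x M : Int),
    pvReach pre (ys ++ [x]) M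
      = pvReach pre ys M ++ (if pvCnt ((pre ++ ys) ++ [x]) x = M then [x] else []) := by
  induction ys with
  | nil => intro pre x M; simp [pvReach]
  | cons y ys ih =>
      intro pre x M
      simp only [List.cons_append, pvReach, ih (pre ++ [y]) x M, List.append_assoc, List.nil_append]

lemma pvMem_reach : ∀ (rest pre : List Int) (M m : Int), m ∈ pvReach pre rest M →
    ∃ q : List Int, (q ++ [m]) <+: (pre ++ rest) ∧ pvCnt (q ++ [m]) m = M := by
  intro rest
  induction rest with
  | nil => intro pre M m h; simp [pvReach] at h
  | cons x xs ih =>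
      intro pre M m h
      rcases List.mem_append.mp h with h1 | h2
      · by_cases hc : pvCnt (pre ++ [x]) x = M
        · simp [hc] at h1
          subst h1
          exact ⟨pre, ⟨xs, by simp⟩, hc⟩
        · simp [hc] at h1
      · obtain ⟨q, hq, hcq⟩ := ih (pre ++ [x]) M m h2
        refine ⟨q, ?_, hcq⟩
        simpa [List.append_assoc] using hq
lemma pvReach_le {p : List Int} {M m : Int} (h : m ∈ pvReach [] p M) : M ≤ pvCnt p m := by
  obtain ⟨q, hq, hcq⟩ := pvMem_reach p [] M m (by simpa using h)
  have hsub : (q ++ [m]).count m ≤ p.count m := hq.sublist.count_le m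
  have : pvCnt (q ++ [m]) m ≤ pvCnt p m := by
    simp only [pvCnt]; exact_mod_cast hsub
  omega

lemma pvReach_nil {p : List Int} {B M : Int} (hb : ∀ m, pvCnt p m ≤ B) (h : B < M) :
    pvReach [] p M = [] := by
  rcases hres : pvReach [] p M with _ | ⟨m, t⟩
  · rfl
  · have hm : m ∈ pvReach [] p M := by rw [hres]; simp
    have := pvReach_le hm
    have := hb m
    omega

lemma pvNot_mem_reach {p : List Int} {M x : Int} (h : pvCnt p x < M) :
    x ∉ pvReach [] p M := fun hx => absurd (pvReach_le hx) (by omega)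

-- invariant of A's loop over the processed prefix p
def pvAInv (p : List Int) (s : PySem.Dict Int Int × List Int × Int) : Prop :=
  (∀ m, s.1.getD m 0 = pvCnt p m) ∧
  (∀ m, s.1.contains m = true ↔ m ∈ p) ∧
  (∀ m, pvCnt p m ≤ s.2.2) ∧
  (p ≠ [] → ∃ m ∈ p, pvCnt p m = s.2.2) ∧
  (p = [] → s.2.2 = 0) ∧
  s.2.1 = pvReach [] p s.2.2

lemma pvA_step (p : List Int) (x : Int) (s : PySem.Dict Int Int × List Int × Int)
    (h : pvAInv p s) : pvAInv (p ++ [x]) (pvStepA s x) := by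
  obtain ⟨hget, hcon, hbound, hwit, hnil, hmost⟩ := h
  have hfreq : (if s.1.contains x then s.1.insert x (s.1.getD x 0 + 1) else s.1.insert x 1)
      = s.1.insert x (pvCnt p x + 1) := by
    by_cases hc : s.1.contains x = true
    · simp [hc, hget x]
    · have hx : x ∉ p := fun hx => hc ((hcon x).mpr hx)
      have : pvCnt p x = 0 := by simp [pvCnt, List.count_eq_zero.mpr hx]
      simp [hc, this]
  have hf : (s.1.insert x (pvCnt p x + 1)).getD x 0 = pvCnt (p ++ [x]) x := by
    rw [PySem.Dict.getD_insert_self, pvCnt_append_singleton]; simp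
  have hget' : ∀ m, (s.1.insert x (pvCnt p x + 1)).getD m 0 = pvCnt (p ++ [x]) m := by
    intro m
    rw [PySem.Dict.getD_insert, pvCnt_append_singleton, hget m]
    by_cases hm : m = x <;> simp [hm]
  have hcon' : ∀ m, (s.1.insert x (pvCnt p x + 1)).contains m = true ↔ m ∈ p ++ [x] := by
    intro m
    rw [PySem.Dict.contains_insert]
    by_cases hm : m = x <;> simp [hm, hcon m]
  have hcx : pvCnt (p ++ [x]) x = pvCnt p x + 1 := by rw [pvCnt_append_singleton]; simp
  have hcother : ∀ m, m ≠ x → pvCnt (p ++ [x]) m = pvCnt p m := by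
    intro m hm; rw [pvCnt_append_singleton]; simp [hm]
  simp only [pvStepA, hfreq, hf]
  by_cases h1 : s.2.2 < pvCnt (p ++ [x]) x
  · -- new maximum: reset to [x]
    simp only [if_pos h1]
    refine ⟨hget', hcon', ?_, ?_, by simp, ?_⟩
    · intro m
      dsimp only
      by_cases hm : m = x
      · simp [hm]
      · rw [hcother m hm]; have := hbound m; omega
    · intro _; exact ⟨x, by simp, rfl⟩
    · rw [pvReach_append, pvReach_nil hbound h1]
      simp [hcx]
  · simp only [if_neg h1]
    have hple : pvCnt (p ++ [x]) x ≤ s.2.2 := by omega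
    have hpne : p ≠ [] := by
      intro hp
      have := hnil hp
      have := pvCnt_nonneg p x
      rw [hcx] at hple
      subst hp
      simp [pvCnt] at hcx ⊢
      omega
    by_cases h2 : pvCnt (p ++ [x]) x = s.2.2 ∧ x ∉ s.2.1
    · -- reaches the current maximum: append
      simp only [if_pos h2]
      refine ⟨hget', hcon', ?_, ?_, by simp, ?_⟩
      · intro m
        dsimp only
        by_cases hm : m = x
        · rw [hm, hcx]; omega
        · rw [hcother m hm]; exact hbound m
      · intro _; exact ⟨x, by simp, h2.1⟩
      · rw [pvReach_append, hmost]
        simp [h2.1]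
    · -- below the maximum (the "= max but already a member" case is impossible)
      simp only [if_neg h2]
      have hlt : pvCnt (p ++ [x]) x < s.2.2 := by
        rcases lt_or_eq_of_le hple with h | h
        · exact h
        · exfalso
          apply h2
          refine ⟨h, ?_⟩
          rw [hmost]
          apply pvNot_mem_reach
          omega
      refine ⟨hget', hcon', ?_, ?_, by simp, ?_⟩
      · intro m
        dsimp only
        by_cases hm : m = x
        · rw [hm]; omega
        · rw [hcother m hm]; exact hbound m
      · intro _
        obtain ⟨m, hmp, hmc⟩ := hwit hpne
        have hmx : m ≠ x := by
          intro he; subst he; rw [hcx] at hlt; omega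
        exact ⟨m, by simp [hmp], by rw [hcother m hmx]; exact hmc⟩
      · rw [pvReach_append, hmost]
        have : pvCnt (p ++ [x]) x ≠ s.2.2 := by omega
        simp [this]

lemma pvA_loop (p : List Int) :
    pvAInv p (p.foldl pvStepA (PySem.Dict.empty, ([] : List Int), (0 : Int))) := by
  induction p using List.reverseRecOn with
  | nil =>
      refine ⟨by simp [pvCnt], by simp, by simp [pvCnt], by simp, by simp, by simp [pvReach]⟩
  | append_singleton p x ih =>
      rw [List.foldl_append]
      exact pvA_step p x _ ih

-- invariant of B's second loop
def pvBInv (M : Int) (p : List Int) (st : PySem.Dict Int Int × List Int) : Prop :=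
  (∀ m, st.1.getD m 0 = pvCnt p m) ∧ st.2 = pvReach [] p M

lemma pvB_loop (M : Int) (p : List Int) :
    pvBInv M p (p.foldl (pvStepB M) (PySem.Dict.empty, ([] : List Int))) := by
  induction p using List.reverseRecOn with
  | nil => exact ⟨by simp [pvCnt], by simp [pvReach]⟩
  | append_singleton p x ih =>
      rw [List.foldl_append]
      obtain ⟨hget, hres⟩ := ih
      constructor
      · intro m
        simp only [List.foldl_cons, List.foldl_nil, pvStepB]
        rw [PySem.Dict.getD_insert, pvCnt_append_singleton, hget m]
        by_cases hm : m = x <;> simp [hm, hget x]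
      · simp only [List.foldl_cons, List.foldl_nil, pvStepB]
        rw [PySem.Dict.getD_insert_self, hget x, pvReach_append, hres]
        have hc : pvCnt (p ++ [x]) x = pvCnt p x + 1 := by
          simp [pvCnt_append_singleton]
        by_cases hM : pvCnt p x + 1 = M <;> simp [hc, hM]

-- B's first pass computes Counter(marks); its max value is A's final max_frequency
lemma pvM_eq (marks : List Int) (hne : marks ≠ []) :
    (PySem.List.max?
        (marks.foldl (fun d m => d.insert m (d.getD m 0 + 1)) PySem.Dict.empty).values
        (fun v => v)).getD 0
      = (marks.foldl pvStepA (PySem.Dict.empty, ([] : List Int), (0 : Int))).2.2 := by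
  obtain ⟨_, _, hbound, hwit, _, _⟩ := pvA_loop marks
  have hcounter : marks.foldl (fun d m => d.insert m (d.getD m 0 + 1)) PySem.Dict.empty
      = PySem.Dict.counter marks := PySem.Dict.foldl_insert_getD_add_one_eq_counter marks
  have hvals : (PySem.Dict.counter marks).values
      = (PySem.Dict.counter marks).keys.map (fun k => (PySem.Dict.counter marks).getD k 0) :=
    PySem.Dict.values_eq_map_keys _ (PySem.Dict.nodup_keys_counter marks) 0
  have hkeys : (PySem.Dict.counter marks).keys = PySem.Set.ofList marks :=
    PySem.Dict.keys_counter marks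
  obtain ⟨m0, hm0⟩ : ∃ m0, m0 ∈ marks := by
    cases marks with
    | nil => exact absurd rfl hne
    | cons a t => exact ⟨a, by simp⟩
  have hvne : (PySem.Dict.counter marks).values ≠ [] := by
    rw [hvals, hkeys]
    have : m0 ∈ PySem.Set.ofList marks := (PySem.Set.mem_ofList _ _).mpr hm0
    intro hcontra
    rw [List.map_eq_nil_iff] at hcontra
    rw [hcontra] at this
    simp at this
  rw [hcounter]
  rcases hmax : PySem.List.max? (PySem.Dict.counter marks).values (fun v => v) with _ | v
  · exact absurd ((PySem.List.max?_eq_none_iff _ _).mp hmax) hvne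
  · have hvmem := PySem.List.max?_mem hmax
    have hvmax := PySem.List.max?_isMax hmax
    -- v is one of the counts, so v ≤ maxf
    have hvle : v ≤ (marks.foldl pvStepA (PySem.Dict.empty, ([] : List Int), (0 : Int))).2.2 := by
      rw [hvals, hkeys] at hvmem
      obtain ⟨k, hk, hkv⟩ := List.mem_map.mp hvmem
      rw [PySem.Dict.getD_counter] at hkv
      have := hbound k
      simp only [pvCnt] at this
      omega
    -- maxf is one of the counts, so maxf ≤ v
    have hge : (marks.foldl pvStepA (PySem.Dict.empty, ([] : List Int), (0 : Int))).2.2 ≤ v := by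
      obtain ⟨m1, hm1, hc1⟩ := hwit hne
      have hmem : pvCnt marks m1 ∈ (PySem.Dict.counter marks).values := by
        rw [hvals, hkeys]
        exact List.mem_map.mpr ⟨m1, (PySem.Set.mem_ofList _ _).mpr hm1,
          by rw [PySem.Dict.getD_counter]; rfl⟩
      have := hvmax _ hmem
      omega
    simp only [Option.getD_some]
    omega

-- ===== VERDICT (by name: the statement is the Claim_ definition above) =====
theorem find_most_frequent_mark_spec : Claim_equal_find_most_frequent_mark := by
  intro marks _
  unfold Spec_find_most_frequent_mark
  by_cases hne : marks = []
  · simp [find_most_frequent_mark, find_most_frequent_mark_alt, hne]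
  · simp only [find_most_frequent_mark, find_most_frequent_mark_alt, if_neg hne]
    obtain ⟨_, _, _, _, _, hmost⟩ := pvA_loop marks
    obtain ⟨_, hres⟩ := pvB_loop
      ((PySem.List.max?
          (marks.foldl (fun d m => d.insert m (d.getD m 0 + 1)) PySem.Dict.empty).values
          (fun v => v)).getD 0) marks
    rw [hmost, hres, pvM_eq marks hne]
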